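-- pv_equiv track=rewrite | github.com/pypi-data/pypi-mirror-361 | packages/pyvvisf/pyvvisf-0.7.1.tar.gz/pyvvisf-0.7.1/src/pyvvisf/shader_compiler.py | find_insertion_point
-- ===== SOURCE A (Python) =====
-- from typing import List, Optional, Any, Dict
--
-- def find_insertion_point(lines: List[str]) -> int:
--     """Find the best insertion point for uniform declarations."""
--     insert_idx = 0
--     for i, line in enumerate(lines):
--         if line.strip().startswith('#version'):
--             insert_idx = i + 1
--         elif line.strip().startswith('out vec4 fragColor;'):
--             insert_idx = i + 1
--     return insert_idx
-- ===== SOURCE B (Python) =====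
-- def find_insertion_point(lines):
--     """Find the best insertion point for uniform declarations."""
--     for i in range(len(lines) - 1, -1, -1):
--         s = lines[i].strip()
--         if s.startswith('#version') or s.startswith('out vec4 fragColor;'):
--             return i + 1
--     return 0
-- ===== Notes on version B (the rewrite author's own statement) =====
-- stated objective: alternative
-- what changed: B scans backward from the end and returns on the first (i.e. last-in-file) matching line, replacing A's full forward scan that keeps overwriting the last match.
import Mathlib
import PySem

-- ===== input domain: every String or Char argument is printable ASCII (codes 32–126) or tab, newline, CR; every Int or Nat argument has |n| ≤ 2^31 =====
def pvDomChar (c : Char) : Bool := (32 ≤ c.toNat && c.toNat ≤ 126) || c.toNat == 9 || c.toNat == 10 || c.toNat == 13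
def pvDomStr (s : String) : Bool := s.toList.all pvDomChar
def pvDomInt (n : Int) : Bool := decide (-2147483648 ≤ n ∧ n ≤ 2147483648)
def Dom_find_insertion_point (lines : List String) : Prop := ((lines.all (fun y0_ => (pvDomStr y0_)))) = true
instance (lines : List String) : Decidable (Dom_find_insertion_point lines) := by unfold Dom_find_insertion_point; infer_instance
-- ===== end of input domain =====

-- B replaces A's full forward scan (keeping the last match) by a backward scan that
-- returns at the first matching line from the end; same result, different traversal.


-- ===== PORT A =====
-- forward scan over enumerate(lines), overwriting insert_idx on each match
def find_insertion_point (lines : List String) : Int :=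
  (PySem.List.enumerate lines).foldl
    (fun insert_idx p =>
      if PySem.Str.startswith (PySem.Str.strip p.2) "#version" then p.1 + 1
      else if PySem.Str.startswith (PySem.Str.strip p.2) "out vec4 fragColor;" then p.1 + 1
      else insert_idx) 0

-- ===== PORT B =====
-- backward scan: first matching line from the end wins; 0 if none
def fipGoBack : List (Int × String) → Int
  | [] => 0
  | (i, l) :: rest =>
    let s := PySem.Str.strip l
    if PySem.Str.startswith s "#version" || PySem.Str.startswith s "out vec4 fragColor;" then
      i + 1
    else fipGoBack rest

def find_insertion_point_alt (lines : List String) : Int :=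
  fipGoBack (PySem.List.enumerate lines).reverse

-- ===== PRECONDITION & SPEC =====
def Spec_find_insertion_point (lines : List String) (out : Int) : Prop := out = find_insertion_point_alt lines
instance (lines : List String) (out : Int) : Decidable (Spec_find_insertion_point lines out) := by unfold Spec_find_insertion_point; infer_instance

-- ===== CLAIM (what is proved, stated in full; the proofs are below) =====
def Claim_equal_find_insertion_point : Prop := ∀ (lines : List String), Dom_find_insertion_point lines → Spec_find_insertion_point lines (find_insertion_point lines)

-- ===== LEMMAS AND PROOFS =====

theorem fip_foldl_eq_goBack (ps : List (Int × String)) :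
    ps.foldl
      (fun insert_idx p =>
        if PySem.Str.startswith (PySem.Str.strip p.2) "#version" then p.1 + 1
        else if PySem.Str.startswith (PySem.Str.strip p.2) "out vec4 fragColor;" then p.1 + 1
        else insert_idx) 0 = fipGoBack ps.reverse := by
  induction ps using List.reverseRecOn with
  | nil => rfl
  | append_singleton qs p ih =>
    rcases p with ⟨i, l⟩
    simp only [List.foldl_append, List.foldl_cons, List.foldl_nil, List.reverse_append,
      List.reverse_cons, List.reverse_nil, List.nil_append, List.cons_append, fipGoBack]
    rw [ih]
    split_ifs with h1 h2 h3 <;> simp_all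

-- ===== VERDICT (by name: the statement is the Claim_ definition above) =====
theorem find_insertion_point_spec : Claim_equal_find_insertion_point := by
  intro lines _
  unfold Spec_find_insertion_point find_insertion_point find_insertion_point_alt
  exact fip_foldl_eq_goBack _
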